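-- pv_equiv track=rewrite | github.com/BoatInTheRiver/codes_algorithm | 剑指Offer/剑指 Offer 13. 机器人的运动范围.py | sumofdigit
-- ===== SOURCE A (Python) =====
-- def sumofdigit(x, y):
--     res = 0
--     while x:
--         res += x % 10
--         x //= 10
--     while y:
--         res += y % 10
--         y //= 10
--     return res
-- ===== SOURCE B (Python) =====
-- def sumofdigit(x, y):
--     return sum(int(c) for c in str(x)) + sum(int(c) for c in str(y))
-- ===== Notes on version B (the rewrite author's own statement) =====
-- stated objective: idiomatic
-- what changed: B sums the decimal digit characters of str(x) and str(y) instead of peeling digits with %10 and //10 in while-loops.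
import Mathlib
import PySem

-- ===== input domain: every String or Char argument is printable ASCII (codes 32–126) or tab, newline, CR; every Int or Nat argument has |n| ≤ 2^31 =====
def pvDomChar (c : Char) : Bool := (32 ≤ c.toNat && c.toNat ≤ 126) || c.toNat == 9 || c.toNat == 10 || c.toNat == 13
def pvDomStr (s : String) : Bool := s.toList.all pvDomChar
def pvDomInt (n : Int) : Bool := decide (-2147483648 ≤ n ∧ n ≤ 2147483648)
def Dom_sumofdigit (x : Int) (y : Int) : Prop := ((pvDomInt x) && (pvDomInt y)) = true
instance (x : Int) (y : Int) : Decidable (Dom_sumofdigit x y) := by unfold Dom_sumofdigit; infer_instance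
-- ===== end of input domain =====

-- B sums the decimal digit characters of str(x)/str(y) instead of peeling digits with %10 and //10 (idiomatic; same cost).
-- Pre_ excludes negative inputs, on which the Python A never returns (its while-loops do not terminate for x < 0).


-- ===== PORT A =====
-- 'while x: res += x % 10; x //= 10', transcribed with a fuel parameter only to make it total
-- (for x < 0 the Python loop never terminates; such inputs are excluded by Pre_ below).
-- Fuel x.natAbs + 1 is enough for every x ≥ 0 since x // 10 < x for x ≥ 1.
def pyDigitLoop : Nat → Int → Int → Int
  | 0, _, res => res
  | f + 1, x, res =>
    if x = 0 then res
    else pyDigitLoop f (PySem.Int.floordiv x 10) (res + PySem.Int.mod x 10)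

def sumofdigit (x : Int) (y : Int) : Int :=
  pyDigitLoop (y.natAbs + 1) y (pyDigitLoop (x.natAbs + 1) x 0)

-- ===== PORT B =====
-- sum(int(c) for c in str(x)) : each digit character c contributes ord(c) - 48
def strDigitSum (x : Int) : Int :=
  (((PySem.Int.toStr x).toList).map (fun c => (c.toNat : Int) - 48)).sum

def sumofdigit_alt (x : Int) (y : Int) : Int :=
  strDigitSum x + strDigitSum y

-- ===== PRECONDITION & SPEC =====
-- Pre_ excludes negative inputs: there the Python A loops forever (returns nothing).
def Pre_sumofdigit (x : Int) (y : Int) : Prop := 0 ≤ x ∧ 0 ≤ y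
instance (x : Int) (y : Int) : Decidable (Pre_sumofdigit x y) := by unfold Pre_sumofdigit; infer_instance
def pvWitness_sumofdigit : Int × Int := (407, 39)

def Spec_sumofdigit (x : Int) (y : Int) (out : Int) : Prop := out = sumofdigit_alt x y
instance (x : Int) (y : Int) (out : Int) : Decidable (Spec_sumofdigit x y out) := by unfold Spec_sumofdigit; infer_instance

-- ===== CLAIM (what is proved, stated in full; the proofs are below) =====
def Claim_equal_sumofdigit : Prop := ∀ (x : Int) (y : Int), Dom_sumofdigit x y → Pre_sumofdigit x y → Spec_sumofdigit x y (sumofdigit x y)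

-- ===== LEMMAS AND PROOFS =====

-- A's loop, on a natural number with enough fuel, adds the base-10 digit sum to the accumulator.
theorem pyDigitLoop_eq (f : Nat) : ∀ (n : Nat) (res : Int), n ≤ f →
    pyDigitLoop (f + 1) (n : Int) res = res + ((Nat.digits 10 n).sum : Int) := by
  induction f with
  | zero =>
    intro n res h
    interval_cases n
    simp [pyDigitLoop]
  | succ f ih =>
    intro n res h
    by_cases hn : n = 0
    · subst hn; simp [pyDigitLoop]
    · have hpos : 0 < n := Nat.pos_of_ne_zero hn
      have hcast : (n : Int) ≠ 0 := by exact_mod_cast hn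
      have hstep : pyDigitLoop (f + 1 + 1) (n : Int) res
          = pyDigitLoop (f + 1) (((n / 10 : Nat) : Int)) (res + ((n % 10 : Nat) : Int)) := by
        have h1 : PySem.Int.floordiv (n : Int) 10 = ((n / 10 : Nat) : Int) := by
          exact_mod_cast PySem.Int.floordiv_natCast n 10
        have h2 : PySem.Int.mod (n : Int) 10 = ((n % 10 : Nat) : Int) := by
          exact_mod_cast PySem.Int.mod_natCast n 10
        conv_lhs => rw [pyDigitLoop]
        rw [if_neg hcast, h1, h2]
      rw [hstep]
      have hle : n / 10 ≤ f := by
        have := Nat.div_lt_self hpos (by norm_num : 1 < 10)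
        omega
      rw [ih (n / 10) _ hle]
      rw [Nat.digits_def' (by norm_num : 1 < 10) hpos]
      simp only [List.sum_cons]
      push_cast
      ring

-- a digit character contributes its digit value
theorem digitChar_val (d : Nat) (hd : d < 10) :
    ((Nat.digitChar d).toNat : Int) - 48 = (d : Int) := by
  interval_cases d <;> decide

-- mapped digit-sum of toDigitsCore
theorem toDigitsCore_sum (f : Nat) : ∀ (n : Nat) (ds : List Char), n ≤ f →
    ((Nat.toDigitsCore 10 (f + 1) n ds).map (fun c => (c.toNat : Int) - 48)).sum
      = ((Nat.digits 10 n).sum : Int) + ((ds.map (fun c => (c.toNat : Int) - 48)).sum) := by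
  induction f with
  | zero =>
    intro n ds h
    interval_cases n
    simp [Nat.toDigitsCore]
    decide
  | succ f ih =>
    intro n ds h
    by_cases hn : n = 0
    · subst hn
      simp [Nat.toDigitsCore]
      decide
    · have hpos : 0 < n := Nat.pos_of_ne_zero hn
      have hmod : n % 10 < 10 := Nat.mod_lt n (by norm_num)
      have hdig := digitChar_val (n % 10) hmod
      rw [Nat.digits_def' (by norm_num : 1 < 10) hpos]
      by_cases hdiv : n / 10 = 0
      · simp [Nat.toDigitsCore, hdiv, hdig]
      · have hle : n / 10 ≤ f := by
          have := Nat.div_lt_self hpos (by norm_num : 1 < 10)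
          omega
        have hstep : Nat.toDigitsCore 10 (f + 1 + 1) n ds
            = Nat.toDigitsCore 10 (f + 1) (n / 10) (Nat.digitChar (n % 10) :: ds) := by
          simp [Nat.toDigitsCore, hdiv]
        rw [hstep, ih (n / 10) _ hle]
        simp [hdig]
        ring

-- B's string digit sum equals the base-10 digit sum, for nonnegative x
theorem strDigitSum_eq (x : Int) (hx : 0 ≤ x) :
    strDigitSum x = ((Nat.digits 10 x.toNat).sum : Int) := by
  unfold strDigitSum
  rw [PySem.Int.toList_toStr]
  have hneg : ¬ x < 0 := by omega
  simp only [PySem.Int.toChars, hneg, if_false]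
  unfold Nat.toDigits
  rw [toDigitsCore_sum x.toNat x.toNat [] (le_refl _)]
  simp

-- ===== VERDICT (by name: the statement is the Claim_ definition above) =====
theorem sumofdigit_spec : Claim_equal_sumofdigit := by
  intro x y _ hpre
  obtain ⟨hx, hy⟩ := hpre
  unfold Spec_sumofdigit sumofdigit sumofdigit_alt
  obtain ⟨n, rfl⟩ := Int.eq_ofNat_of_zero_le hx
  obtain ⟨m, rfl⟩ := Int.eq_ofNat_of_zero_le hy
  rw [Int.natAbs_natCast, Int.natAbs_natCast,
    pyDigitLoop_eq n n 0 (le_refl _),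
    pyDigitLoop_eq m m _ (le_refl _),
    strDigitSum_eq (n : Int) (by positivity), strDigitSum_eq (m : Int) (by positivity)]
  simp
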